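-- pv_equiv track=rewrite | github.com/cualestunombre/Algorithm | 힙/PCCP모의고사 4번 운영체제.py | solution
-- ===== SOURCE A (Python) =====
-- import heapq as pq
--
-- def solution(program):
--     count={}
--     answer=[]
--     heap = []
--     endtime=0
--     program.sort(key=lambda x:(-x[1],-x[0]))
--     while heap or program:
--         if heap: #힙에는 종료시간 전에것 만 넣을 것
--             score,time,runtime=pq.heappop(heap)
--             if score in count:
--                 count[score]+=endtime-time
--             else:
--                 count[score]=endtime-time
--             endtime = endtime + runtime
--         else:
--             score,time,runtime=program.pop()
--             endtime=time+runtime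
--         while program and program[-1][1]<=endtime:
--             score,time,runtime=program.pop()
--             pq.heappush(heap,(score,time,runtime))
--     answer.append(endtime)
--     for i in range(1,11):
--         if i in count:
--             answer.append(count[i])
--         else:
--             answer.append(0)
--     return answer
-- ===== SOURCE B (Python) =====
-- def _insort(lst, item):
--     # insert item into ascending-sorted lst, after any equal elements
--     k = 0
--     while k < len(lst) and lst[k] <= item:
--         k += 1
--     lst.insert(k, item)
--
-- def solution(program):
--     # arrivals in ascending (time, score); among full ties, later-listed first (as A consumes them)
--     order = sorted(program, key=lambda r: (-r[1], -r[0]))[::-1]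
--     n = len(order)
--     i = 0
--     ready = []          # sorted ascending by (score, time, runtime); head = next to run
--     endtime = 0
--     wait = {}
--     while i < n or ready:
--         if ready:
--             score, time, runtime = ready.pop(0)
--             wait[score] = wait.get(score, 0) + (endtime - time)
--             endtime += runtime
--         else:
--             score, time, runtime = order[i]
--             i += 1
--             endtime = time + runtime
--         while i < n and order[i][1] <= endtime:
--             s, t, r = order[i]
--             _insort(ready, (s, t, r))
--             i += 1
--     return [endtime] + [wait.get(s, 0) for s in range(1, 11)]
-- ===== Notes on version B (the rewrite author's own statement) =====
-- stated objective: simpler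
-- what changed: B drops heapq in favour of a plain list kept sorted ascending (linear insertion, pop the head) and walks a reversed sorted copy of the arrivals with an index pointer instead of A's in-place descending sort plus pop()-from-the-end, with the waiting-time dict updated via get-with-default and the answer built by a comprehension; B also leaves the argument list unmutated where A sorts and empties it in place.
import Mathlib
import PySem

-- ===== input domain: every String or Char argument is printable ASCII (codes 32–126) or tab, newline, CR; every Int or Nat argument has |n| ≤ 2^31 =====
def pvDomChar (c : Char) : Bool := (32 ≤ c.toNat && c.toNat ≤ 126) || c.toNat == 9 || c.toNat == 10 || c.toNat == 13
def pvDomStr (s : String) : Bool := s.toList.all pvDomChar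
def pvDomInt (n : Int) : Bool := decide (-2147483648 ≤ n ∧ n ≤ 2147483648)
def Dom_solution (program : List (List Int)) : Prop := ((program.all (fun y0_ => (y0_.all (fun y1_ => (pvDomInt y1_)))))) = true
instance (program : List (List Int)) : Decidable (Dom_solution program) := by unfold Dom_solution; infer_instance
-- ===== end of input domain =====

-- B replaces A's heapq priority queue by a list kept sorted (linear insertion, pop the head) and walks the
-- arrival list with an index instead of sorting it in place and popping from its end: simpler bookkeeping,
-- same results.  Equivalence is about the RETURN value only: Python A sorts and empties its argument in
-- place, B leaves it untouched.

-- ===== PORT A =====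
-- a job tuple (score, time, runtime); rows are unpacked via their first three entries
def toTriple (r : List Int) : Int × Int × Int :=
  (PySem.List.pyGetD r 0 0, PySem.List.pyGetD r 1 0, PySem.List.pyGetD r 2 0)

-- Python's lexicographic '<' / '<=' on the 3-tuples (score, time, runtime)
def lexLtB (a b : Int × Int × Int) : Bool :=
  decide (a.1 < b.1 ∨ (a.1 = b.1 ∧ (a.2.1 < b.2.1 ∨ (a.2.1 = b.2.1 ∧ a.2.2 < b.2.2))))
def lexLeB (a b : Int × Int × Int) : Bool :=
  decide (a.1 < b.1 ∨ (a.1 = b.1 ∧ (a.2.1 < b.2.1 ∨ (a.2.1 = b.2.1 ∧ a.2.2 ≤ b.2.2))))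

-- heapq is modelled as the multiset of its entries: heappush appends, heappop removes the
-- lexicographically least tuple (exact: heappop returns the least tuple, equal tuples are identical)
def heapMin (h : Int × Int × Int) (t : List (Int × Int × Int)) : Int × Int × Int :=
  t.foldl (fun a b => if lexLtB b a then b else a) h

-- 'while program and program[-1][1] <= endtime: heappush(heap, program.pop())'
def refillA (heap : List (Int × Int × Int)) (prog : List (List Int)) (endt : Int) :
    List (Int × Int × Int) × List (List Int) :=
  match prog with
  | [] => (heap, [])
  | p :: ps =>
    if PySem.List.pyGetD ((p :: ps).getLastD []) 1 0 ≤ endt then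
      refillA (heap ++ [toTriple ((p :: ps).getLastD [])]) ((p :: ps).dropLast) endt
    else (heap, p :: ps)
termination_by prog.length
decreasing_by simp

theorem heapMin_mem (t : List (Int × Int × Int)) (h : Int × Int × Int) :
    heapMin h t ∈ h :: t := by
  induction t generalizing h with
  | nil => simp [heapMin]
  | cons x xs ih =>
    have := ih (if lexLtB x h then x else h)
    simp only [heapMin, List.foldl_cons] at *
    rcases List.mem_cons.mp this with h1 | h1
    · rw [h1]; split <;> simp
    · simp [h1]

-- refillA on 'prog' with the last element split off
theorem refillA_concat (heap : List (Int × Int × Int)) (init : List (List Int)) (x : List Int)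
    (endt : Int) :
    refillA heap (init ++ [x]) endt =
      if PySem.List.pyGetD x 1 0 ≤ endt then refillA (heap ++ [toTriple x]) init endt
      else (heap, init ++ [x]) := by
  cases init with
  | nil => rw [refillA]; simp [refillA]
  | cons p ps =>
    rw [show (p :: ps) ++ [x] = p :: (ps ++ [x]) from rfl, refillA]
    have h1 : (p :: (ps ++ [x])).getLastD [] = x := by
      rw [← List.cons_append]; exact List.getLastD_concat
    have h2 : (p :: (ps ++ [x])).dropLast = p :: ps := by
      rw [← List.cons_append]; exact List.dropLast_concat
    rw [h1, h2]

theorem refillA_len (heap : List (Int × Int × Int)) (prog : List (List Int)) (endt : Int) :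
    (refillA heap prog endt).1.length + (refillA heap prog endt).2.length
      = heap.length + prog.length := by
  induction prog using List.reverseRecOn generalizing heap with
  | nil => simp [refillA]
  | append_singleton init x ih =>
    rw [refillA_concat]
    split
    · have := ih (heap ++ [toTriple x]); simp at this ⊢; omega
    · simp

-- the outer 'while heap or program' loop of A; state = (heap, program, endtime, count)
def loopA (heap : List (Int × Int × Int)) (prog : List (List Int)) (endt : Int)
    (cnt : PySem.Dict Int Int) : Int × PySem.Dict Int Int :=
  match heap, prog with
  | [], [] => (endt, cnt)
  | h :: t, prog =>
    -- score,time,runtime = heappop(heap)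
    let m := heapMin h t
    let heap1 := (h :: t).erase m
    let cnt1 := match cnt.get? m.1 with
      | some v => cnt.insert m.1 (v + (endt - m.2.1))
      | none => cnt.insert m.1 (endt - m.2.1)
    let endt1 := endt + m.2.2
    let hp := refillA heap1 prog endt1
    loopA hp.1 hp.2 endt1 cnt1
  | [], p :: ps =>
    -- score,time,runtime = program.pop()
    let m := toTriple ((p :: ps).getLastD [])
    let endt1 := m.2.1 + m.2.2
    let hp := refillA [] ((p :: ps).dropLast) endt1
    loopA hp.1 hp.2 endt1 cnt
termination_by heap.length + prog.length
decreasing_by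
  · have h1 := refillA_len ((h :: t).erase (heapMin h t)) prog (endt + (heapMin h t).2.2)
    have h2 : ((h :: t).erase (heapMin h t)).length = t.length := by
      have := List.length_erase_of_mem (heapMin_mem t h)
      simpa using this
    simp only [List.length_cons]; omega
  · have h1 := refillA_len [] ((p :: ps).dropLast)
      ((toTriple ((p :: ps).getLastD [])).2.1 + (toTriple ((p :: ps).getLastD [])).2.2)
    simp only [List.length_nil, List.length_cons, List.length_dropLast] at h1 ⊢; omega

def solution (program : List (List Int)) : List Int :=
  -- program.sort(key=lambda x: (-x[1], -x[0]))
  let sortedProg := PySem.List.sorted2 program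
    (fun r => -(PySem.List.pyGetD r 1 0)) (fun r => -(PySem.List.pyGetD r 0 0)) false
  let res := loopA [] sortedProg 0 PySem.Dict.empty
  -- answer.append(endtime); for i in range(1, 11): answer.append(count[i] if i in count else 0)
  (PySem.List.pyRange 1 11 1).foldl
    (fun acc i => acc ++ [match res.2.get? i with | some v => v | none => 0]) [res.1]

-- ===== PORT B =====
-- _insort: insert into the ascending-sorted ready list, after any equal elements
def insortT (x : Int × Int × Int) (l : List (Int × Int × Int)) : List (Int × Int × Int) :=
  match l with
  | [] => [x]
  | y :: ys => if lexLeB y x then y :: insortT x ys else x :: y :: ys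

theorem length_insortT (x : Int × Int × Int) (l : List (Int × Int × Int)) :
    (insortT x l).length = l.length + 1 := by
  induction l with
  | nil => rfl
  | cons y ys ih => rw [insortT]; split <;> simp [ih]

-- 'while i < n and order[i][1] <= endtime: _insort(ready, tuple(order[i])); i += 1'
-- (the index walk over 'order' is the front of the remaining list 'rest')
def refillB (ready : List (Int × Int × Int)) (rest : List (List Int)) (endt : Int) :
    List (Int × Int × Int) × List (List Int) :=
  match rest with
  | [] => (ready, [])
  | r :: rs =>
    if PySem.List.pyGetD r 1 0 ≤ endt then refillB (insortT (toTriple r) ready) rs endt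
    else (ready, r :: rs)

theorem refillB_len (ready : List (Int × Int × Int)) (rest : List (List Int)) (endt : Int) :
    (refillB ready rest endt).1.length + (refillB ready rest endt).2.length
      = ready.length + rest.length := by
  induction rest generalizing ready with
  | nil => simp [refillB]
  | cons r rs ih =>
    rw [refillB]
    split
    · have := ih (insortT (toTriple r) ready); rw [length_insortT] at this
      simp only [List.length_cons]; omega
    · simp

-- the outer 'while i < n or ready' loop of B; state = (ready, rest-of-order, endtime, wait)
def loopB (ready : List (Int × Int × Int)) (rest : List (List Int)) (endt : Int)
    (wait : PySem.Dict Int Int) : Int × PySem.Dict Int Int :=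
  match ready, rest with
  | [], [] => (endt, wait)
  | m :: rs, rest =>
    -- score,time,runtime = ready.pop(0)
    let wait1 := wait.insert m.1 (wait.getD m.1 0 + (endt - m.2.1))
    let endt1 := endt + m.2.2
    let rr := refillB rs rest endt1
    loopB rr.1 rr.2 endt1 wait1
  | [], r :: rs =>
    -- score,time,runtime = order[i]; i += 1
    let m := toTriple r
    let endt1 := m.2.1 + m.2.2
    let rr := refillB [] rs endt1
    loopB rr.1 rr.2 endt1 wait
termination_by ready.length + rest.length
decreasing_by
  · have := refillB_len rs rest (endt + m.2.2); simp only [List.length_cons]; omega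
  · have := refillB_len [] rs ((toTriple r).2.1 + (toTriple r).2.2)
    simp only [List.length_nil, List.length_cons] at this ⊢; omega

def solution_alt (program : List (List Int)) : List Int :=
  -- order = sorted(program, key=lambda r: (-r[1], -r[0]))[::-1]   ([::-1] = reverse,
  -- PySem.List.slice?_none_none_neg_one)
  let order := (PySem.List.sorted2 program
    (fun r => -(PySem.List.pyGetD r 1 0)) (fun r => -(PySem.List.pyGetD r 0 0)) false).reverse
  let res := loopB [] order 0 PySem.Dict.empty
  -- [endtime] + [wait.get(s, 0) for s in range(1, 11)]
  res.1 :: (PySem.List.pyRange 1 11 1).map (fun s => res.2.getD s 0)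

-- ===== PRECONDITION & SPEC =====
-- Pre_ excludes exactly the inputs where Python A raises: a row with fewer than 3 entries hits an
-- IndexError/ValueError, one with more a ValueError on tuple unpacking; rows of length 3 always return.
def Pre_solution (program : List (List Int)) : Prop := ∀ r ∈ program, r.length = 3
instance (program : List (List Int)) : Decidable (Pre_solution program) := by
  unfold Pre_solution; infer_instance

def pvWitness_solution : List (List Int) := [[3, 2, 5], [1, 0, 5], [2, 0, 2]]

def Spec_solution (program : List (List Int)) (out : List Int) : Prop := out = solution_alt program
instance (program : List (List Int)) (out : List Int) : Decidable (Spec_solution program out) := by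
  unfold Spec_solution; infer_instance

-- ===== CLAIM (what is proved, stated in full; the proofs are below) =====
def Claim_equal_solution : Prop := ∀ (program : List (List Int)), Dom_solution program → Pre_solution program → Spec_solution program (solution program)

-- ===== LEMMAS AND PROOFS =====

-- the ordering as a Prop, for stating the sortedness invariant
def lexLe (a b : Int × Int × Int) : Prop := lexLeB a b = true

theorem lexLe_refl (a : Int × Int × Int) : lexLe a a := by
  obtain ⟨a1, a2, a3⟩ := a
  simp [lexLe, lexLeB]

theorem lexLe_of_lt {a b : Int × Int × Int} (h : lexLtB a b = true) : lexLe a b := by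
  obtain ⟨a1, a2, a3⟩ := a; obtain ⟨b1, b2, b3⟩ := b
  simp only [lexLtB, decide_eq_true_eq] at h
  simp [lexLe, lexLeB]
  omega

theorem lexLe_of_not_lt {a b : Int × Int × Int} (h : ¬ lexLtB a b = true) : lexLe b a := by
  obtain ⟨a1, a2, a3⟩ := a; obtain ⟨b1, b2, b3⟩ := b
  simp [lexLtB] at h
  simp [lexLe, lexLeB]
  omega

theorem lexLe_trans {a b c : Int × Int × Int} (h1 : lexLe a b) (h2 : lexLe b c) : lexLe a c := by
  obtain ⟨a1, a2, a3⟩ := a; obtain ⟨b1, b2, b3⟩ := b; obtain ⟨c1, c2, c3⟩ := c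
  simp [lexLe, lexLeB] at h1 h2 ⊢; omega

theorem lexLe_antisymm {a b : Int × Int × Int} (h1 : lexLe a b) (h2 : lexLe b a) : a = b := by
  obtain ⟨a1, a2, a3⟩ := a; obtain ⟨b1, b2, b3⟩ := b
  simp [lexLe, lexLeB] at h1 h2
  simp only [Prod.mk.injEq]; omega

theorem heapMin_le (t : List (Int × Int × Int)) (h : Int × Int × Int) :
    ∀ x ∈ h :: t, lexLe (heapMin h t) x := by
  induction t generalizing h with
  | nil => intro x hx; simp at hx; subst hx; exact lexLe_refl _
  | cons y ys ih =>
    intro x hx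
    have step : heapMin h (y :: ys) = heapMin (if lexLtB y h then y else h) ys := by
      simp [heapMin]
    rw [step]
    have hmin : ∀ z ∈ (if lexLtB y h then y else h) :: ys,
        lexLe (heapMin (if lexLtB y h then y else h) ys) z := ih _
    have hle_h : lexLe (heapMin (if lexLtB y h then y else h) ys) h := by
      by_cases hyx : lexLtB y h = true
      · exact lexLe_trans (hmin _ (by simp [hyx])) (lexLe_of_lt hyx)
      · simpa [hyx] using hmin _ (by simp [hyx])
    have hle_y : lexLe (heapMin (if lexLtB y h then y else h) ys) y := by
      by_cases hyx : lexLtB y h = true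
      · simpa [hyx] using hmin _ (by simp [hyx])
      · exact lexLe_trans (by simpa [hyx] using hmin _ (by simp [hyx])) (lexLe_of_not_lt hyx)
    rcases List.mem_cons.mp hx with hx | hx
    · exact hx ▸ hle_h
    · rcases List.mem_cons.mp hx with hx | hx
      · exact hx ▸ hle_y
      · exact hmin _ (by simp [hx])

-- the heap pop: on a heap that is a permutation of the sorted ready list m :: rs,
-- the popped minimum is m and the rest is a permutation of rs
theorem pop_eq (h : Int × Int × Int) (t rs : List (Int × Int × Int)) (m : Int × Int × Int)
    (hperm : (h :: t).Perm (m :: rs)) (hsort : (m :: rs).Pairwise lexLe) :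
    heapMin h t = m ∧ ((h :: t).erase (heapMin h t)).Perm rs := by
  have hmem : heapMin h t ∈ m :: rs := hperm.mem_iff.mp (heapMin_mem t h)
  have hml : lexLe m (heapMin h t) := by
    rcases List.mem_cons.mp hmem with he | hin
    · exact he ▸ lexLe_refl m
    · exact (List.pairwise_cons.mp hsort).1 _ hin
  have hlm : lexLe (heapMin h t) m :=
    heapMin_le t h m (hperm.mem_iff.mpr (List.mem_cons_self))
  have heq : heapMin h t = m := lexLe_antisymm hlm hml
  refine ⟨heq, ?_⟩
  rw [heq]
  have hmmem : m ∈ h :: t := heq ▸ heapMin_mem t h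
  have h1 : (h :: t).Perm (m :: (h :: t).erase m) := List.perm_cons_erase hmmem
  exact (List.Perm.cons_inv (h1.symm.trans hperm))

theorem insortT_perm (x : Int × Int × Int) (l : List (Int × Int × Int)) :
    (insortT x l).Perm (x :: l) := by
  induction l with
  | nil => rfl
  | cons y ys ih =>
    rw [insortT]
    split
    · exact ((ih.cons y).trans (List.Perm.swap x y ys))
    · rfl

theorem insortT_sorted (x : Int × Int × Int) (l : List (Int × Int × Int))
    (hs : l.Pairwise lexLe) : (insortT x l).Pairwise lexLe := by
  induction l with
  | nil => simp [insortT]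
  | cons y ys ih =>
    rw [insortT]
    obtain ⟨hy, hys⟩ := List.pairwise_cons.mp hs
    split
    · rename_i hyx
      refine List.pairwise_cons.mpr ⟨?_, ih hys⟩
      intro z hz
      rcases List.mem_cons.mp ((insortT_perm x ys).mem_iff.mp hz) with hz | hz
      · exact hz ▸ hyx
      · exact hy _ hz
    · rename_i hyx
      have hxy : lexLe x y := by
        by_cases hlt : lexLtB y x = true
        · exact absurd (lexLe_of_lt hlt) hyx
        · exact lexLe_of_not_lt hlt
      refine List.pairwise_cons.mpr ⟨?_, hs⟩
      intro z hz
      rcases List.mem_cons.mp hz with hz | hz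
      · exact hz ▸ hxy
      · exact lexLe_trans hxy (hy _ hz)

-- the two refill loops walk the same jobs (A from the end of prog, B from the front of its reverse);
-- they keep heap and ready equal as multisets, ready sorted, and the remainders reversed copies
theorem refill_rel (prog : List (List Int)) :
    ∀ (heap ready : List (Int × Int × Int)) (endt : Int),
      heap.Perm ready → ready.Pairwise lexLe →
      (refillA heap prog endt).1.Perm (refillB ready prog.reverse endt).1 ∧
      (refillB ready prog.reverse endt).1.Pairwise lexLe ∧
      (refillB ready prog.reverse endt).2 = (refillA heap prog endt).2.reverse := by
  induction prog using List.reverseRecOn with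
  | nil =>
    intro heap ready endt hperm hsort
    simp only [refillA, List.reverse_nil, refillB]
    exact ⟨hperm, hsort, trivial⟩
  | append_singleton init x ih =>
    intro heap ready endt hperm hsort
    rw [refillA_concat, List.reverse_append, List.reverse_singleton, List.singleton_append,
      refillB]
    split
    · exact ih (heap ++ [toTriple x]) (insortT (toTriple x) ready) endt
        ((List.perm_append_singleton _ _).trans
          ((hperm.cons (toTriple x)).trans (insortT_perm _ _).symm))
        (insortT_sorted _ _ hsort)
    · exact ⟨hperm, hsort, by simp⟩

-- A's two-branch count update is B's get-with-default update
theorem cnt_step (d : PySem.Dict Int Int) (k δ : Int) :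
    (match d.get? k with
      | some v => d.insert k (v + δ)
      | none => d.insert k δ) = d.insert k (d.getD k 0 + δ) := by
  cases h : d.get? k with
  | some v => simp [PySem.Dict.getD_eq_get?_getD, h]
  | none => simp [PySem.Dict.getD_eq_get?_getD, h]

theorem loopA_concat (init : List (List Int)) (x : List Int) (endt : Int)
    (cnt : PySem.Dict Int Int) :
    loopA [] (init ++ [x]) endt cnt =
      (let m := toTriple x
       let endt1 := m.2.1 + m.2.2
       let hp := refillA [] init endt1
       loopA hp.1 hp.2 endt1 cnt) := by
  cases init with
  | nil => rw [loopA.eq_def]; dsimp only; rfl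
  | cons p ps =>
    rw [show (p :: ps) ++ [x] = p :: (ps ++ [x]) from rfl, loopA.eq_def]
    dsimp only
    have h1 : (p :: (ps ++ [x])).getLastD [] = x := by
      rw [← List.cons_append]; exact List.getLastD_concat
    have h2 : (p :: (ps ++ [x])).dropLast = p :: ps := by
      rw [← List.cons_append]; exact List.dropLast_concat
    rw [h1, h2]

-- main invariant: with heap ~ ready (ready sorted) and B's remaining arrivals the reverse of A's,
-- the two outer loops return the same (endtime, waiting-time dict)
theorem loop_rel (n : Nat) :
    ∀ (heap : List (Int × Int × Int)) (prog : List (List Int))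
      (ready : List (Int × Int × Int)) (endt : Int) (cnt : PySem.Dict Int Int),
      heap.length + prog.length = n → heap.Perm ready → ready.Pairwise lexLe →
      loopA heap prog endt cnt = loopB ready prog.reverse endt cnt := by
  induction n using Nat.strong_induction_on with
  | _ n ih =>
    intro heap prog ready endt cnt hn hperm hsort
    match heap, prog with
    | [], [] =>
      have : ready = [] := hperm.nil_eq.symm
      subst this
      rw [loopA.eq_def, loopB.eq_def]
      rfl
    | h :: t, prog =>
      obtain ⟨m, rs, hready⟩ : ∃ m rs, ready = m :: rs := by
        cases hr : ready with
        | nil => exact absurd (hr ▸ hperm).eq_nil (by simp)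
        | cons a b => exact ⟨a, b, rfl⟩
      subst hready
      obtain ⟨hmin, herase⟩ := pop_eq h t rs m hperm hsort
      rw [hmin] at herase
      rw [loopA.eq_def, loopB.eq_def]
      dsimp only
      rw [hmin]
      simp only [cnt_step]
      obtain ⟨p1, p2, p3⟩ := refill_rel prog ((h :: t).erase m) rs (endt + m.2.2) herase
        (List.pairwise_cons.mp hsort).2
      have hlen : ((h :: t).erase m).length = t.length := by
        have hmmem : m ∈ h :: t := hmin ▸ heapMin_mem t h
        have := List.length_erase_of_mem hmmem
        simpa using this
      have hrec := ih ((refillA ((h :: t).erase m) prog (endt + m.2.2)).1.length +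
          (refillA ((h :: t).erase m) prog (endt + m.2.2)).2.length)
        (by
          have := refillA_len ((h :: t).erase m) prog (endt + m.2.2)
          simp only [List.length_cons] at hn
          omega)
        (refillA ((h :: t).erase m) prog (endt + m.2.2)).1
        (refillA ((h :: t).erase m) prog (endt + m.2.2)).2
        (refillB rs prog.reverse (endt + m.2.2)).1 (endt + m.2.2)
        (cnt.insert m.1 (cnt.getD m.1 0 + (endt - m.2.1))) rfl p1 p2
      rw [hrec, ← p3]
    | [], p :: ps =>
      have hready : ready = [] := hperm.nil_eq.symm
      subst hready
      obtain ⟨init, x, hpx⟩ := (List.eq_nil_or_concat (p :: ps)).resolve_left (by simp)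
      rw [List.concat_eq_append] at hpx
      rw [hpx, loopA_concat, List.reverse_append, List.reverse_singleton,
        List.singleton_append, loopB.eq_def]
      dsimp only
      obtain ⟨p1, p2, p3⟩ := refill_rel init [] [] ((toTriple x).2.1 + (toTriple x).2.2)
        (List.Perm.refl []) (by simp)
      have hrec := ih ((refillA [] init ((toTriple x).2.1 + (toTriple x).2.2)).1.length +
          (refillA [] init ((toTriple x).2.1 + (toTriple x).2.2)).2.length)
        (by
          have := refillA_len [] init ((toTriple x).2.1 + (toTriple x).2.2)
          have hl : (p :: ps).length = init.length + 1 := by rw [hpx]; simp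
          simp only [List.length_nil, List.length_cons] at this hn hl ⊢
          omega)
        (refillA [] init ((toTriple x).2.1 + (toTriple x).2.2)).1
        (refillA [] init ((toTriple x).2.1 + (toTriple x).2.2)).2
        (refillB [] init.reverse ((toTriple x).2.1 + (toTriple x).2.2)).1
        ((toTriple x).2.1 + (toTriple x).2.2) cnt rfl p1 p2
      rw [hrec, ← p3]

-- ===== VERDICT (by name: the statement is the Claim_ definition above) =====
theorem solution_spec : Claim_equal_solution := by
  unfold Claim_equal_solution
  intro program _ _
  unfold Spec_solution solution solution_alt
  simp only
  rw [← loop_rel ((0 : Nat) + (PySem.List.sorted2 program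
      (fun r => -(PySem.List.pyGetD r 1 0)) (fun r => -(PySem.List.pyGetD r 0 0)) false).length)
    [] _ [] 0 PySem.Dict.empty rfl (List.Perm.refl []) (by simp)]
  rw [PySem.List.foldl_append_singleton_eq_map, List.singleton_append]
  congr 1
  apply List.map_congr_left
  intro i _
  rw [PySem.Dict.getD_eq_get?_getD]
  cases (loopA [] _ 0 PySem.Dict.empty).2.get? i <;> rfl
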